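-- pv_equiv track=rewrite | github.com/m709/PS-of-cryptanalysis | Diophant6.py | pi
-- ===== SOURCE A (Python) =====
-- def c(x,y): #канторовская нумерация пар натуральных чисел
--     return int(((x+y)*(x+y)+3*x+y)/2)
--
-- def pi(n,kor): #канторовская нумерация n-элементных кортежей натуральных чисел
--     if(n==len(kor)):
--         if(n>2):
--             kor1=[];
--             kor1.append(c(kor[0],kor[1]))
--             for i in range(2,n):
--                 kor1.append(kor[i])
--             return pi(n-1,kor1)
--         else:
--             return c(kor[0],kor[1])
--     else:
--         return None
-- ===== SOURCE B (Python) =====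
-- def c(x, y):  # same Cantor pairing as A (float division kept so values match A exactly)
--     return int(((x+y)*(x+y)+3*x+y)/2)
--
-- def pi(n, kor):
--     if n != len(kor) or n < 2:
--         return None
--     acc = c(kor[0], kor[1])
--     for x in kor[2:]:
--         acc = c(acc, x)
--     return acc
-- ===== Notes on version B (the rewrite author's own statement) =====
-- stated objective: simpler
-- what changed: replaces A's recursion, which rebuilds an (n-1)-element list at every level, with a single left-to-right fold of the same pairing function c over the tail of kor
-- outside the precondition, e.g. on pi(1, [5]): A raises IndexError, B returns None
import Mathlib
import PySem

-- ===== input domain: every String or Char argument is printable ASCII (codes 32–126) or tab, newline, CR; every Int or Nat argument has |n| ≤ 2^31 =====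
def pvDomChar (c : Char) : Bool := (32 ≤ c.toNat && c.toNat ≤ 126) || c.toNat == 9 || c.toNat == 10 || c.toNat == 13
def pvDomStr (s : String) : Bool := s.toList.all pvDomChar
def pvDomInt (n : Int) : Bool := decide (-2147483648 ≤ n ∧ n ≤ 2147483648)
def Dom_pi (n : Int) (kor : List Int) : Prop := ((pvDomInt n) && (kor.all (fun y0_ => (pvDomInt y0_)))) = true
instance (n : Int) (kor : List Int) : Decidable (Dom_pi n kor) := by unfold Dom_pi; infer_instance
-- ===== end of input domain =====

-- B replaces A's recursion (which rebuilds an (n-1)-element list at each level) by a single left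
-- fold of the SAME pairing function c over the tail of kor; equivalence of the RETURN value on Pre_.

-- ===== PORT A =====
-- Hand-ported exactly: Python rounds an integer to the nearest IEEE double (53 significant bits,
-- ties to even); modelled here in exact integer arithmetic, exact whenever no OverflowError
-- occurs (|v| below 2^1024), which Pre_pi guarantees.
def roundD (v : Int) : Int :=
  let n := v.natAbs
  if n < 2 ^ 53 then v
  else
    let e := n.log2 - 52
    let q := n / 2 ^ e
    let r := n % 2 ^ e
    let h := 2 ^ (e - 1)
    let n' := if r > h ∨ (r = h ∧ q % 2 = 1) then (q + 1) * 2 ^ e else q * 2 ^ e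
    if v < 0 then -(n' : Int) else (n' : Int)

-- helper c of both Pythons: int(((x+y)*(x+y)+3*x+y)/2) with FLOAT true division = the numerator
-- correctly rounded to a double, exactly halved (the numerator is always even, so the division
-- below is exact and int()'s truncation is the identity).
def c (x y : Int) : Int := roundD ((x + y) * (x + y) + 3 * x + y) / 2

def pi (n : Int) (kor : List Int) : Option Int :=
  if _h : n = (kor.length : Int) then
    if h2 : n > 2 then
      -- in this branch n = len kor ≥ 3, so every index below is in range: pyGetD is exact here
      let kor1 : List Int :=
        c (PySem.List.pyGetD kor 0 0) (PySem.List.pyGetD kor 1 0) ::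
          (PySem.List.pyRange 2 n 1).map (fun i => PySem.List.pyGetD kor i 0)
      pi (n - 1) kor1
    else
      match PySem.List.pyGet? kor 0, PySem.List.pyGet? kor 1 with
      | some a, some b => some (c a b)
      | _, _ => none   -- IndexError (reached only when n = len kor ≤ 1): outside Pre_pi
  else none
termination_by n.toNat
decreasing_by omega

-- ===== PORT B =====
def pi_alt (n : Int) (kor : List Int) : Option Int :=
  if n ≠ (kor.length : Int) ∨ n < 2 then none
  else
    (PySem.List.pyGet? kor 0).bind fun a =>      -- none (IndexError) unreachable: here n = len kor ≥ 2
      (PySem.List.pyGet? kor 1).bind fun b =>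
        some ((PySem.List.slice kor (some 2) none).foldl c (c a b))

-- ===== PRECONDITION & SPEC =====
-- Pre_pi excludes only inputs on which A raises: n = len(kor) ≤ 1 (IndexError), n > 900
-- (RecursionError), and value/length tiers under which the accumulated pairing value could
-- exceed the float maximum (OverflowError); the tiers are conservative, so some excluded
-- inputs still return (B returns the identical value there).  n ≠ len(kor) is all admitted.
def Pre_pi (n : Int) (kor : List Int) : Prop :=
  n = (kor.length : Int) →
    2 ≤ n ∧ n ≤ 900 ∧
      (n ≤ 6 ∨
       (n = 7 ∧ ∀ x ∈ kor, x.natAbs ≤ 16384) ∨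
       (n = 8 ∧ ∀ x ∈ kor, x.natAbs ≤ 64) ∨
       (n = 9 ∧ ∀ x ∈ kor, x.natAbs ≤ 4) ∨
       (n ≤ 11 ∧ ∀ x ∈ kor, x.natAbs ≤ 1) ∨
       (∀ x ∈ kor, x = 0))
instance (n : Int) (kor : List Int) : Decidable (Pre_pi n kor) := by unfold Pre_pi; infer_instance

def pvWitness_pi : Int × List Int := (3, [1, 2, 3])

def Spec_pi (n : Int) (kor : List Int) (out : Option Int) : Prop := out = pi_alt n kor
instance (n : Int) (kor : List Int) (out : Option Int) : Decidable (Spec_pi n kor out) := by unfold Spec_pi; infer_instance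

-- ===== CLAIM (what is proved, stated in full; the proofs are below) =====
def Claim_equal_pi : Prop := ∀ (n : Int) (kor : List Int), Dom_pi n kor → Pre_pi n kor → Spec_pi n kor (pi n kor)

-- ===== LEMMAS AND PROOFS =====

-- the appended range(2, len kor) of kor[i]'s in A is exactly the tail drop of kor
lemma map_range_drop (xs : List Int) (k j : Nat) (hk : xs.length - j = k) :
    (PySem.List.pyRange (j : Int) (xs.length : Int) 1).map (fun i => PySem.List.pyGetD xs i 0)
      = xs.drop j := by
  induction k generalizing j with
  | zero =>
      have h : xs.length ≤ j := by omega
      have : PySem.List.pyRange (j : Int) (xs.length : Int) 1 = [] := by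
        simp [PySem.List.pyRange]
        omega
      simp [this, List.drop_eq_nil_of_le h]
  | succ k ih =>
      have h : j < xs.length := by omega
      rw [PySem.List.pyRange_one_cons (by exact_mod_cast h)]
      have hstep : ((j : Int) + 1) = ((j + 1 : Nat) : Int) := by push_cast; ring
      rw [List.map_cons, hstep, ih (j + 1) (by omega)]
      rw [List.drop_eq_getElem_cons h]
      simp [PySem.List.pyGetD_natCast, List.getD_eq_getElem?_getD, h]

lemma piA_fold (rest : List Int) : ∀ (a b : Int),
    pi (((a :: b :: rest).length : Int)) (a :: b :: rest) = some (rest.foldl c (c a b)) := by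
  induction rest with
  | nil =>
      intro a b
      rw [pi]
      simp [PySem.List.pyGet?, PySem.List.pyIdx?]
  | cons x rs ih =>
      intro a b
      rw [pi]
      have h2 : (((a :: b :: x :: rs).length : Nat) : Int) > 2 := by simp; omega
      rw [dif_pos h2]
      have hrange : (PySem.List.pyRange 2 (((a :: b :: x :: rs).length : Nat) : Int) 1).map
          (fun i => PySem.List.pyGetD (a :: b :: x :: rs) i 0) = x :: rs := by
        have := map_range_drop (a :: b :: x :: rs) ((a :: b :: x :: rs).length - 2) 2 rfl
        simpa using this
      have hg0 : PySem.List.pyGetD (a :: b :: x :: rs) 0 0 = a := by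
        have h0 : (0 : Int) ≤ (rs.length : Int) + 1 + 1 := by positivity
        simp [PySem.List.pyGetD, PySem.List.pyGet?, PySem.List.pyIdx?, h0]
      have hg1 : PySem.List.pyGetD (a :: b :: x :: rs) 1 0 = b := by
        have h1 : (0 : Int) ≤ (rs.length : Int) + 1 := by positivity
        simp [PySem.List.pyGetD, PySem.List.pyGet?, PySem.List.pyIdx?, h1]
      rw [hg0, hg1, hrange]
      have hlen' : ((((a :: b :: x :: rs).length : Nat) : Int) - 1)
          = (((c a b :: x :: rs).length : Nat) : Int) := by simp
      rw [hlen', ih (c a b) x]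
      simp [List.foldl_cons]

-- ===== VERDICT (by name: the statement is the Claim_ definition above) =====
theorem pi_spec : Claim_equal_pi := by
  unfold Claim_equal_pi
  intro n kor _ hpre
  unfold Spec_pi
  by_cases h : n = (kor.length : Int)
  · have h2 : (2 : Int) ≤ n := (hpre h).1
    match kor with
    | [] => simp at h; omega
    | [a] => simp at h; omega
    | a :: b :: rest =>
        subst h
        rw [piA_fold rest a b]
        unfold pi_alt
        rw [if_neg (by simp)]
        have h1 : (0 : Int) ≤ (rest.length : Int) + 1 := by positivity
        simp only [show PySem.List.pyGet? (a :: b :: rest) 0 = some a by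
            simp [PySem.List.pyGet?, PySem.List.pyIdx?, h1],
          show PySem.List.pyGet? (a :: b :: rest) 1 = some b by
            simp [PySem.List.pyGet?, PySem.List.pyIdx?]]
        rw [show ((2 : Int)) = ((2 : Nat) : Int) by simp, PySem.List.slice_from_natCast]
        simp
  · rw [pi, dif_neg h]
    unfold pi_alt
    rw [if_pos (Or.inl h)]
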